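-- pv_equiv track=rewrite | github.com/ITE-Ensenada/Automatas-1 | linter.py | token_isopen
-- ===== SOURCE A (Python) =====
-- dicc_html = {
--     "!<DOCTYPE>": 0,
--     "<html" : 10,
--     "</html": 11,
--     "<head" : 12,
--     "</head": 13,
--     "<body" : 14,
--     "</body": 15,
--     "<title": 16,
--     "</title":17,
--     "<p": 30,
--     "<br":31 ,
--     "<hr":32,
--     "<!--":33,
--     "-->":34,
--     "<div":35,
--     "<h1":20,
--     "<h2":21,
--     "<h3":22,
--     "<h4":23,
--     "<h5":24,
--     "<h6":25,
--     "<a":26,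
--     "</a":27,
-- }
--
-- def token_isopen(token):
--     for key,value in dicc_html.items():
--         if value == token:
--             if token in [0,31]:
--                 return 2
--                 pass
--             elif token == 34:
--                 return 1
--             elif '/' in key:
--                 return 1
--             else:
--                 return 0
-- ===== SOURCE B (Python) =====
-- dicc_html = {
--     "!<DOCTYPE>": 0,
--     "<html" : 10,
--     "</html": 11,
--     "<head" : 12,
--     "</head": 13,
--     "<body" : 14,
--     "</body": 15,
--     "<title": 16,
--     "</title":17,
--     "<p": 30,
--     "<br":31 ,
--     "<hr":32,
--     "<!--":33,
--     "-->":34,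
--     "<div":35,
--     "<h1":20,
--     "<h2":21,
--     "<h3":22,
--     "<h4":23,
--     "<h5":24,
--     "<h6":25,
--     "<a":26,
--     "</a":27,
-- }
--
-- def _classify(key, value):
--     """Classification of one dict entry: 2 = void, 1 = closing, 0 = opening."""
--     if value in (0, 31):
--         return 2
--     if value == 34 or '/' in key:
--         return 1
--     return 0
--
-- # full answer table, precomputed ONCE: token code -> classification
-- _CLASS = {v: _classify(k, v) for k, v in dicc_html.items()}
--
-- def token_isopen(token):
--     # single branch-free table lookup; .get gives None for unknown codes
--     return _CLASS.get(token)
-- ===== Notes on version B (the rewrite author's own statement) =====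
-- stated objective: idiomatic
-- what changed: Replaces A's per-call linear scan with inline branching by a complete answer table (token code -> classification) precomputed once from the dict; the function itself is a single branch-free dict .get lookup.
import Mathlib
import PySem

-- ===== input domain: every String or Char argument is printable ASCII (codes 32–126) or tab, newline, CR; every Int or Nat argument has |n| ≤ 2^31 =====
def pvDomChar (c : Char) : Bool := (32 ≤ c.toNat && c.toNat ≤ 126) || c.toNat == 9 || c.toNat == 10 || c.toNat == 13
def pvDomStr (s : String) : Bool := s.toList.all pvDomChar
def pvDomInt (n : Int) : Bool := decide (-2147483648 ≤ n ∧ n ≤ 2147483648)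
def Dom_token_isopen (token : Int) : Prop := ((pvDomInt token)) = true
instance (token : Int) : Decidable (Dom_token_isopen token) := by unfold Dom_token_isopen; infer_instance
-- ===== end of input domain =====

-- B precomputes a complete answer table (code -> classification) once from the dict and the
-- function is a single table lookup, replacing A's per-call scan with inline branching.

-- ===== PORT A =====
def dicc_html : List (String × Int) :=
  [("!<DOCTYPE>", 0), ("<html", 10), ("</html", 11), ("<head", 12), ("</head", 13),
   ("<body", 14), ("</body", 15), ("<title", 16), ("</title", 17), ("<p", 30),
   ("<br", 31), ("<hr", 32), ("<!--", 33), ("-->", 34), ("<div", 35),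
   ("<h1", 20), ("<h2", 21), ("<h3", 22), ("<h4", 23), ("<h5", 24), ("<h6", 25),
   ("<a", 26), ("</a", 27)]

-- the 'for key,value in dicc_html.items()' loop of A, step for step
def tokenLoop (token : Int) : List (String × Int) → Option Int
  | [] => none
  | (key, value) :: rest =>
    if value = token then
      if token = 0 ∨ token = 31 then some 2
      else if token = 34 then some 1
      else if PySem.Str.isIn "/" key then some 1
      else some 0
    else tokenLoop token rest

def token_isopen (token : Int) : Option Int := tokenLoop token dicc_html

-- ===== PORT B =====
-- _classify(key, value)
def classify (key : String) (value : Int) : Int :=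
  if value = 0 ∨ value = 31 then 2
  else if value = 34 ∨ PySem.Str.isIn "/" key then 1
  else 0

-- _CLASS = {v: _classify(k, v) for k, v in dicc_html.items()}
def classTable : PySem.Dict Int Int :=
  dicc_html.foldl (fun d kv => d.insert kv.2 (classify kv.1 kv.2)) PySem.Dict.empty

-- return _CLASS.get(token)
def token_isopen_alt (token : Int) : Option Int := classTable.get? token

-- ===== PRECONDITION & SPEC =====
def Spec_token_isopen (token : Int) (out : Option Int) : Prop := out = token_isopen_alt token
instance (token : Int) (out : Option Int) : Decidable (Spec_token_isopen token out) := by unfold Spec_token_isopen; infer_instance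

-- ===== CLAIM =====
def Claim_equal_token_isopen : Prop := ∀ (token : Int), Dom_token_isopen token → Spec_token_isopen token (token_isopen token)

-- ===== LEMMAS AND PROOFS =====
theorem both_none_of_not_valid (token : Int)
    (h : token ∉ ([0, 10, 11, 12, 13, 14, 15, 16, 17, 30, 31, 32, 33, 34, 35, 20, 21, 22, 23, 24, 25, 26, 27] : List Int)) :
    token_isopen token = token_isopen_alt token := by
  simp only [List.mem_cons, List.not_mem_nil, or_false, not_or] at h
  obtain ⟨h0, h10, h11, h12, h13, h14, h15, h16, h17, h30, h31, h32, h33, h34, h35,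
    h20, h21, h22, h23, h24, h25, h26, h27⟩ := h
  simp [token_isopen, token_isopen_alt, tokenLoop, dicc_html, classTable, classify,
    PySem.Dict.get?, PySem.Dict.insert, PySem.Dict.empty,
    Ne.symm h0, Ne.symm h10, Ne.symm h11, Ne.symm h12, Ne.symm h13,
    Ne.symm h14, Ne.symm h15, Ne.symm h16, Ne.symm h17, Ne.symm h30, Ne.symm h31,
    Ne.symm h32, Ne.symm h33, Ne.symm h34, Ne.symm h35, Ne.symm h20, Ne.symm h21,
    Ne.symm h22, Ne.symm h23, Ne.symm h24, Ne.symm h25, Ne.symm h26, Ne.symm h27,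
    h0, h10, h11, h12, h13, h14, h15, h16, h17, h30, h31, h32, h33, h34, h35,
    h20, h21, h22, h23, h24, h25, h26, h27]

-- ===== VERDICT =====
theorem token_isopen_spec : Claim_equal_token_isopen := by
  intro token _
  unfold Spec_token_isopen
  by_cases h : token ∈ ([0, 10, 11, 12, 13, 14, 15, 16, 17, 30, 31, 32, 33, 34, 35, 20, 21, 22, 23, 24, 25, 26, 27] : List Int)
  · fin_cases h <;> decide
  · exact both_none_of_not_valid token h
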